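-- pv_equiv track=rewrite | github.com/scikit-learn/scikit-learn | sklearn-env/lib/python3.9/site-packages/sphinx/ext/napoleon/docstring.py | _recombine_set_tokens
-- ===== SOURCE A (Python) =====
-- import collections
-- from typing import Any, Callable, Dict, List, Tuple, Type, Union
--
-- def _recombine_set_tokens(tokens: List[str]) -> List[str]:
--     token_queue = collections.deque(tokens)
--     keywords = ("optional", "default")
--
--     def takewhile_set(tokens):
--         open_braces = 0
--         previous_token = None
--         while True:
--             try:
--                 token = tokens.popleft()
--             except IndexError:
--                 break
--
--             if token == ", ":
--                 previous_token = token
--                 continue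
--
--             if not token.strip():
--                 continue
--
--             if token in keywords:
--                 tokens.appendleft(token)
--                 if previous_token is not None:
--                     tokens.appendleft(previous_token)
--                 break
--
--             if previous_token is not None:
--                 yield previous_token
--                 previous_token = None
--
--             if token == "{":
--                 open_braces += 1
--             elif token == "}":
--                 open_braces -= 1
--
--             yield token
--
--             if open_braces == 0:
--                 break
--
--     def combine_set(tokens):
--         while True:
--             try:
--                 token = tokens.popleft()
--             except IndexError:
--                 break
--
--             if token == "{":
--                 tokens.appendleft("{")
--                 yield "".join(takewhile_set(tokens))
--             else:
--                 yield token
--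
--     return list(combine_set(token_queue))
-- ===== SOURCE B (Python) =====
-- def _recombine_set_tokens(tokens):
--     keywords = ("optional", "default")
--     out = []
--     in_set = False
--     depth = 0
--     buf = []
--     pending = None
--     for tok in tokens:
--         if not in_set:
--             if tok == "{":
--                 in_set = True
--                 depth = 1
--                 buf = ["{"]
--                 pending = None
--             else:
--                 out.append(tok)
--         elif tok == ", ":
--             pending = tok
--         elif not tok.strip():
--             pass
--         elif tok in keywords:
--             out.append("".join(buf))
--             if pending is not None:
--                 out.append(pending)
--             out.append(tok)
--             in_set = False
--         else:
--             if pending is not None: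
--                 buf.append(pending)
--                 pending = None
--             if tok == "{":
--                 depth += 1
--             elif tok == "}":
--                 depth -= 1
--             buf.append(tok)
--             if depth == 0:
--                 out.append("".join(buf))
--                 in_set = False
--     if in_set:
--         out.append("".join(buf))
--     return out
-- ===== Notes on version B (the rewrite author's own statement) =====
-- stated objective: simpler
-- what changed: Replaces A's deque with two nested generators and push-back (appendleft) by a single flat pass over the token list driven by an explicit state machine (in_set flag, brace depth, buffer, pending comma).
import Mathlib
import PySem

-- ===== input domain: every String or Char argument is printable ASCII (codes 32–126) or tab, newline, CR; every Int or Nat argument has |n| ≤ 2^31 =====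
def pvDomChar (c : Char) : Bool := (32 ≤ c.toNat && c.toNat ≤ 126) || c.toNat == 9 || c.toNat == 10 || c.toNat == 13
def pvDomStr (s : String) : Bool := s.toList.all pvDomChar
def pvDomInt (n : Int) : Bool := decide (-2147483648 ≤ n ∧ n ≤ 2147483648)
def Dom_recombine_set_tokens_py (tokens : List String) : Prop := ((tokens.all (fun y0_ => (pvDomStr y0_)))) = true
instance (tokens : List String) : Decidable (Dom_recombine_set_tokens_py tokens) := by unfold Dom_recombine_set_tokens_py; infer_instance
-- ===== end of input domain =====

-- B replaces A's two nested deque generators with one flat state-machine pass (flag/depth/buffer/pending accumulator); objective: simpler, same cost.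

-- ===== PORT A =====
-- "".join(parts)
def pyStrJoin (parts : List String) : String := PySem.Str.join "" parts

-- takewhile_set: consumes from the queue, returns (yielded tokens, remaining queue)
def takewhileSetA : Option String → Int → List String → List String × List String
  | _, _, [] => ([], [])
  | prev, ob, t :: rest =>
    if t == ", " then takewhileSetA (some t) ob rest
    else if PySem.Str.strip t == "" then takewhileSetA prev ob rest
    else if t == "optional" || t == "default" then
      ([], (match prev with | some p => [p] | none => []) ++ t :: rest)
    else
      let ys : List String := match prev with | some p => [p] | none => []
      let ob' := if t == "{" then ob + 1 else if t == "}" then ob - 1 else ob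
      if ob' == 0 then (ys ++ [t], rest)
      else
        let r := takewhileSetA none ob' rest
        (ys ++ t :: r.1, r.2)

-- the remaining queue never grows past the input (keyword push-back restores at most what was consumed)
theorem takewhileSetA_len (q : List String) : ∀ ob : Int,
    (∀ p, (takewhileSetA (some p) ob q).2.length ≤ q.length + 1) ∧
    (takewhileSetA none ob q).2.length ≤ q.length := by
  induction q with
  | nil => intro ob; constructor <;> simp [takewhileSetA]
  | cons t rest ih =>
    intro ob
    constructor
    · intro p
      simp only [takewhileSetA]
      generalize (if t == "{" then ob + 1 else if t == "}" then ob - 1 else ob) = ob'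
      split_ifs with h1 h2 h3 h4
      · have := (ih ob).1 t; simp at this ⊢; omega
      · have := (ih ob).1 p; simp at this ⊢; omega
      · simp
      · simp; omega
      · have := (ih ob').2; simp at this ⊢; omega
    · simp only [takewhileSetA]
      generalize (if t == "{" then ob + 1 else if t == "}" then ob - 1 else ob) = ob'
      split_ifs with h1 h2 h3 h4
      · have := (ih ob).1 t; simp at this ⊢; omega
      · have := (ih ob).2; simp at this ⊢; omega
      · simp
      · simp
      · have := (ih ob').2; simp at this ⊢; omega

theorem takewhileSetA_brace (rest : List String) :
    takewhileSetA none 0 ("{" :: rest) =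
      ("{" :: (takewhileSetA none 1 rest).1, (takewhileSetA none 1 rest).2) := by
  simp [takewhileSetA, show PySem.Str.strip "{" ≠ "" from by decide]

-- combine_set
def combineSetA : List String → List String
  | [] => []
  | t :: rest =>
    if h : t == "{" then
      let r := takewhileSetA none 0 (t :: rest)
      pyStrJoin r.1 :: combineSetA r.2
    else t :: combineSetA rest
termination_by q => q.length
decreasing_by
  · have h' : t = "{" := by simpa using h
    subst h'
    have := (takewhileSetA_len rest 1).2
    rw [takewhileSetA_brace]
    simp at this ⊢; omega
  · simp

def recombine_set_tokens_py (tokens : List String) : List String := combineSetA tokens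

-- ===== PORT B =====
mutual
-- top-level scan: emit tokens; '{' enters set mode with depth 1, buffer ["{"]
def altGo : List String → List String
  | [] => []
  | t :: rest => if t == "{" then altSet ["{"] none 1 rest else t :: altGo rest
termination_by q => (q.length, 1)
decreasing_by all_goals simp_wf <;> omega
-- set mode: buffer, pending comma, brace depth
def altSet (buf : List String) (pending : Option String) (depth : Int) : List String → List String
  | [] => [pyStrJoin buf]
  | t :: rest =>
    if t == ", " then altSet buf (some t) depth rest
    else if PySem.Str.strip t == "" then altSet buf pending depth rest
    else if t == "optional" || t == "default" then
      pyStrJoin buf :: ((match pending with | some p => [p] | none => []) ++ t :: altGo rest)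
    else
      let buf' := buf ++ (match pending with | some p => [p] | none => []) ++ [t]
      let depth' := if t == "{" then depth + 1 else if t == "}" then depth - 1 else depth
      if depth' == 0 then pyStrJoin buf' :: altGo rest
      else altSet buf' none depth' rest
termination_by q => (q.length, 0)
decreasing_by all_goals simp_wf <;> omega
end

def recombine_set_tokens_py_alt (tokens : List String) : List String := altGo tokens

-- ===== PRECONDITION & SPEC =====
def Spec_recombine_set_tokens_py (tokens : List String) (out : List String) : Prop := out = recombine_set_tokens_py_alt tokens
instance (tokens : List String) (out : List String) : Decidable (Spec_recombine_set_tokens_py tokens out) := by unfold Spec_recombine_set_tokens_py; infer_instance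

-- ===== CLAIM (what is proved, stated in full; the proofs are below) =====
def Claim_equal_recombine_set_tokens_py : Prop := ∀ (tokens : List String), Dom_recombine_set_tokens_py tokens → Spec_recombine_set_tokens_py tokens (recombine_set_tokens_py tokens)

-- ===== LEMMAS AND PROOFS =====

theorem combineSetA_cons_ne (t : String) (rest : List String) (h : (t == "{") = false) :
    combineSetA (t :: rest) = t :: combineSetA rest := by
  rw [combineSetA.eq_def]; simp [h]

theorem main_equiv (n : Nat) : ∀ q : List String, q.length ≤ n →
    (altGo q = combineSetA q) ∧
    (∀ buf pending depth, (pending = none ∨ pending = some ", ") →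
      altSet buf pending depth q =
      pyStrJoin (buf ++ (takewhileSetA pending depth q).1) ::
        combineSetA (takewhileSetA pending depth q).2) := by
  induction n with
  | zero =>
    intro q hq
    have : q = [] := List.length_eq_zero_iff.mp (Nat.le_zero.mp hq)
    subst this
    exact ⟨by simp [altGo, combineSetA], fun buf pending depth _ => by
      simp [altSet, takewhileSetA, combineSetA]⟩
  | succ n ih =>
    intro q hq
    cases q with
    | nil =>
      exact ⟨by simp [altGo, combineSetA], fun buf pending depth _ => by
        simp [altSet, takewhileSetA, combineSetA]⟩
    | cons t rest =>
      have hrest : rest.length ≤ n := by simp at hq; omega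
      constructor
      · by_cases hb : (t == "{") = true
        · have ht : t = "{" := by simpa using hb
          subst ht
          rw [altGo, combineSetA]
          simp only [takewhileSetA_brace]
          rw [(ih rest hrest).2 ["{"] none 1 (Or.inl rfl)]
          rfl
        · rw [altGo, combineSetA]
          rw [if_neg (by simp_all), dif_neg (by simp_all)]
          rw [(ih rest hrest).1]
      · intro buf pending depth hp
        rw [altSet.eq_def]
        simp only [takewhileSetA]
        by_cases h1 : (t == ", ") = true
        · rw [if_pos h1, if_pos h1, (ih rest hrest).2 buf (some t) depth
            (Or.inr (by rw [show t = ", " from by simpa using h1]))]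
        · rw [if_neg h1, if_neg h1]
          by_cases h2 : (PySem.Str.strip t == "") = true
          · rw [if_pos h2, if_pos h2, (ih rest hrest).2 buf pending depth hp]
          · rw [if_neg h2, if_neg h2]
            by_cases h3 : (t == "optional" || t == "default") = true
            · rw [if_pos h3, if_pos h3]
              have htb : (t == "{") = false := by
                rcases Bool.or_eq_true _ _ |>.mp h3 with h | h <;> simp_all
              rcases hp with hp | hp <;> subst hp
              · simp [combineSetA_cons_ne t rest htb, (ih rest hrest).1]
              · simp [combineSetA_cons_ne ", " (t :: rest) (by decide),
                  combineSetA_cons_ne t rest htb, (ih rest hrest).1]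
            · rw [if_neg h3, if_neg h3]
              by_cases h4 : ((if t == "{" then depth + 1 else if t == "}" then depth - 1 else depth) == 0) = true
              · rw [if_pos h4, if_pos h4, (ih rest hrest).1]
                rcases hp with hp | hp <;> subst hp <;> simp
              · rw [if_neg h4, if_neg h4]
                rw [(ih rest hrest).2 _ none _ (Or.inl rfl)]
                rcases hp with hp | hp <;> subst hp <;> simp

-- ===== VERDICT (by name: the statement is the Claim_ definition above) =====
theorem recombine_set_tokens_py_spec : Claim_equal_recombine_set_tokens_py := by
  intro tokens _
  unfold Spec_recombine_set_tokens_py recombine_set_tokens_py recombine_set_tokens_py_alt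
  exact ((main_equiv tokens.length tokens le_rfl).1).symm
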